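-- pv_equiv track=rewrite | github.com/cdleary/xlsynth-bvc | testdata/persistent_runners/fake_xlsynth_driver.py | strip_global_options
-- ===== SOURCE A (Python) =====
-- def strip_global_options(argv: list[str]) -> list[str]:
--     stripped: list[str] = []
--     i = 0
--     while i < len(argv):
--         if argv[i] == "--toolchain":
--             i += 2
--             continue
--         stripped.append(argv[i])
--         i += 1
--     return stripped
-- ===== SOURCE B (Python) =====
-- def strip_global_options(argv: list[str]) -> list[str]:
--     remove: set[int] = set()
--     for i, arg in enumerate(argv):
--         if i not in remove and arg == "--toolchain":
--             remove.add(i)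
--             remove.add(i + 1)
--     return [arg for i, arg in enumerate(argv) if i not in remove]
-- ===== Notes on version B (the rewrite author's own statement) =====
-- stated objective: alternative
-- what changed: Replaces A's single index-jumping while loop (i += 2 consumes the option and its argument inline) with two staged passes: one pass over enumerate(argv) that computes the set of indices to delete, then a comprehension that rebuilds the list keeping every index not in that set.
import Mathlib
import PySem

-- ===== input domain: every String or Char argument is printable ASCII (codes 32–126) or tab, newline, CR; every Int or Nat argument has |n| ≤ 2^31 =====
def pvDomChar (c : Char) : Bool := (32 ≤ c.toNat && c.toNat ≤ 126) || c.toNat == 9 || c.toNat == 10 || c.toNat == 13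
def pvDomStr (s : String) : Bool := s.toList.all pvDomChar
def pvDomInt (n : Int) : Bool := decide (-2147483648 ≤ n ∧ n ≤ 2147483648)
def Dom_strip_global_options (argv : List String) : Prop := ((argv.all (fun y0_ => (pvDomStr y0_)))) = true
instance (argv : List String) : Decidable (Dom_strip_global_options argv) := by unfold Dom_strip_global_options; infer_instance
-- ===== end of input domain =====

-- B replaces A's index-jumping single pass by two staged passes: first compute the set of
-- indices to delete, then rebuild the list keeping every index outside that set (alternative; same cost).

-- ===== PORT A =====
-- A's while loop over index i (i only ever increases from 0, so it is a Nat); the guard i < len(argv)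
-- makes Python's argv[i] in-range, so the proof-carrying getElem is exact.
def stripLoopA (argv : List String) (i : Nat) (stripped : List String) : List String :=
  if h : i < argv.length then
    if argv[i] = "--toolchain" then
      stripLoopA argv (i + 2) stripped
    else
      stripLoopA argv (i + 1) (stripped ++ [argv[i]])
  else
    stripped
termination_by argv.length - i

def strip_global_options (argv : List String) : List String :=
  stripLoopA argv 0 []

-- ===== PORT B =====
-- first pass of Source B: fold over enumerate(argv) building the set `remove`
def stepRem (rem : PySem.Set Int) (p : Int × String) : PySem.Set Int :=
  if ¬ PySem.Set.contains rem p.1 ∧ p.2 = "--toolchain" then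
    PySem.Set.add (PySem.Set.add rem p.1) (p.1 + 1)
  else rem

def strip_global_options_alt (argv : List String) : List String :=
  let rem := (PySem.List.enumerate argv).foldl stepRem PySem.Set.empty
  (PySem.List.enumerate argv).filterMap
    (fun p => if PySem.Set.contains rem p.1 then none else some p.2)

-- ===== PRECONDITION & SPEC =====
def Spec_strip_global_options (argv : List String) (out : List String) : Prop := out = strip_global_options_alt argv
instance (argv : List String) (out : List String) : Decidable (Spec_strip_global_options argv out) := by unfold Spec_strip_global_options; infer_instance

-- ===== CLAIM =====
def Claim_equal_strip_global_options : Prop := ∀ (argv : List String), Dom_strip_global_options argv → Spec_strip_global_options argv (strip_global_options argv)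

-- ===== LEMMAS AND PROOFS =====

-- A common recursive specification: the kept elements, given whether the current head is already consumed
def stripRec (xs : List String) (skip : Bool) : List String :=
  match xs with
  | [] => []
  | a :: rest =>
    if skip then stripRec rest false
    else if a = "--toolchain" then stripRec rest true
    else a :: stripRec rest false

-- the indices ≥ i that end up removed, given that `skip` says whether i is already marked
def remRec : List String → Int → Bool → List Int
  | [], i, true => [i]
  | [], _, false => []
  | _ :: rest, i, true => i :: remRec rest (i + 1) false
  | a :: rest, i, false =>
    if a = "--toolchain" then i :: remRec rest (i + 1) true else remRec rest (i + 1) false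

theorem mem_remRec_ge (xs : List String) (i : Int) (skip : Bool) (j : Int)
    (h : j ∈ remRec xs i skip) : i ≤ j := by
  induction xs generalizing i skip with
  | nil => cases skip <;> simp [remRec] at h; omega
  | cons a rest ih =>
    cases skip with
    | true =>
      rcases List.mem_cons.mp h with rfl | h
      · omega
      · have := ih (i + 1) false h; omega
    | false =>
      by_cases ht : a = "--toolchain"
      · simp only [remRec, if_pos ht] at h
        rcases List.mem_cons.mp h with rfl | h
        · omega
        · have := ih (i + 1) true h; omega
      · simp only [remRec, if_neg ht] at h
        have := ih (i + 1) false h; omega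

theorem self_mem_remRec_true (xs : List String) (i : Int) : i ∈ remRec xs i true := by
  cases xs <;> simp [remRec]

theorem mem_remRec_cons_self (a : String) (rest : List String) (i : Int) (skip : Bool) :
    i ∈ remRec (a :: rest) i skip ↔ (skip = true ∨ a = "--toolchain") := by
  cases skip with
  | true => simp [remRec]
  | false =>
    by_cases ht : a = "--toolchain"
    · simp [remRec, ht]
    · simp only [remRec, if_neg ht]
      constructor
      · intro h
        have := mem_remRec_ge rest (i + 1) false i h
        omega
      · rintro (h | h)
        · simp at h
        · exact absurd h ht

-- first pass: membership in the final remove set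
theorem build_spec (xs : List String) (i : Int) (rem : PySem.Set Int) (skip : Bool)
    (hgt : ∀ j : Int, i < j → j ∉ rem) (hi : i ∈ rem ↔ skip = true) :
    ∀ j : Int, j ∈ (PySem.List.enumerate xs i).foldl stepRem rem ↔
      (j ∈ rem ∨ j ∈ remRec xs i skip) := by
  induction xs generalizing i rem skip with
  | nil =>
    intro j
    simp only [PySem.List.enumerate_nil, List.foldl_nil]
    cases skip with
    | true =>
      have hmem : i ∈ rem := hi.mpr rfl
      simp only [remRec, List.mem_singleton]
      constructor
      · exact fun h => Or.inl h
      · rintro (h | rfl)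
        · exact h
        · exact hmem
    | false => simp [remRec]
  | cons a rest ih =>
    intro j
    rw [PySem.List.enumerate_cons, List.foldl_cons]
    have hfresh : (i + 1 : Int) ∉ rem := hgt (i + 1) (by omega)
    cases skip with
    | true =>
      have hmem : i ∈ rem := hi.mpr rfl
      have hstep : stepRem rem (i, a) = rem := by
        simp only [stepRem]
        rw [if_neg]
        rintro ⟨hc, -⟩
        exact hc (by simpa using (PySem.Set.contains_iff rem i).mpr hmem)
      rw [hstep,
        ih (i + 1) rem false (fun j hj => hgt j (by omega)) (by simpa using hfresh)]
      simp only [remRec, List.mem_cons]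
      constructor
      · tauto
      · rintro (h | rfl | h) <;> [exact Or.inl h; exact Or.inl hmem; exact Or.inr h]
    | false =>
      have hnot : i ∉ rem := fun h => by simpa using hi.mp h
      by_cases ht : a = "--toolchain"
      · have hstep : stepRem rem (i, a) =
            PySem.Set.add (PySem.Set.add rem i) (i + 1) := by
          simp [stepRem, ht]
          exact fun h => absurd h hnot
        rw [hstep]
        have hmem' : ∀ k : Int, k ∈ PySem.Set.add (PySem.Set.add rem i) (i + 1) ↔
            (k ∈ rem ∨ k = i ∨ k = i + 1) := by
          intro k
          rw [PySem.Set.mem_add, PySem.Set.mem_add]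
          tauto
        have h1 : ∀ j : Int, i + 1 < j → j ∉ PySem.Set.add (PySem.Set.add rem i) (i + 1) := by
          intro j hj
          rw [hmem']
          push Not
          exact ⟨hgt j (by omega), by omega, by omega⟩
        have h2 : (i + 1 : Int) ∈ PySem.Set.add (PySem.Set.add rem i) (i + 1) := by
          rw [hmem']; tauto
        rw [ih (i + 1) _ true h1 (by simpa using h2)]
        have hself : (i + 1 : Int) ∈ remRec rest (i + 1) true := self_mem_remRec_true rest (i + 1)
        rw [hmem' j]
        simp only [remRec, if_pos ht, List.mem_cons]
        constructor
        · rintro ((h | rfl | rfl) | h)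
          · exact Or.inl h
          · exact Or.inr (Or.inl rfl)
          · exact Or.inr (Or.inr hself)
          · exact Or.inr (Or.inr h)
        · rintro (h | rfl | h) <;> tauto
      · have hstep : stepRem rem (i, a) = rem := by
          simp [stepRem, ht]
        rw [hstep,
          ih (i + 1) rem false (fun j hj => hgt j (by omega)) (by simpa using hfresh)]
        simp only [remRec, if_neg ht]
-- second pass: filtering by the removed-index predicate yields stripRec
theorem filter_spec (xs : List String) (i : Int) (skip : Bool) (f : Int → Bool)
    (hf : ∀ j : Int, i ≤ j → (f j = true ↔ j ∈ remRec xs i skip)) :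
    (PySem.List.enumerate xs i).filterMap
      (fun p => if f p.1 then none else some p.2) = stripRec xs skip := by
  induction xs generalizing i skip with
  | nil => simp [PySem.List.enumerate_nil, stripRec]
  | cons a rest ih =>
    rw [PySem.List.enumerate_cons, List.filterMap_cons]
    have hfi : f i = true ↔ (skip = true ∨ a = "--toolchain") := by
      rw [hf i le_rfl, mem_remRec_cons_self]
    cases skip with
    | true =>
      have hft : f i = true := hfi.mpr (Or.inl rfl)
      simp only [hft]
      rw [ih (i + 1) false ?_]
      · simp [stripRec]
      · intro j hj
        have hne : j ≠ i := by omega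
        rw [hf j (by omega)]
        simp [remRec, hne]
    | false =>
      by_cases ht : a = "--toolchain"
      · have hft : f i = true := hfi.mpr (Or.inr ht)
        simp only [hft]
        rw [ih (i + 1) true ?_]
        · simp [stripRec, ht]
        · intro j hj
          have hne : j ≠ i := by omega
          rw [hf j (by omega)]
          simp [remRec, ht, hne]
      · have hff : f i = false := by
          by_cases h : f i = true
          · rcases hfi.mp h with h | h
            · simp at h
            · exact absurd h ht
          · simpa using h
        simp only [hff]
        rw [ih (i + 1) false ?_]
        · simp [stripRec, ht]
        · intro j hj
          rw [hf j (by omega)]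
          simp [remRec, ht]

-- B's whole computation equals stripRec
theorem alt_eq_stripRec (argv : List String) :
    strip_global_options_alt argv = stripRec argv false := by
  unfold strip_global_options_alt
  apply filter_spec
  intro j _
  rw [PySem.Set.contains_iff,
    build_spec argv 0 PySem.Set.empty false (by intro k _; simp [PySem.Set.empty]) (by simp [PySem.Set.empty])]
  simp [PySem.Set.empty]

theorem drop_eq_cons {α : Type} (xs : List α) (i : Nat) (h : i < xs.length) :
    xs.drop i = xs[i] :: xs.drop (i + 1) :=
  List.drop_eq_getElem_cons h

theorem stripLoopA_eq (argv : List String) (i : Nat) (acc : List String) :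
    stripLoopA argv i acc = acc ++ stripRec (argv.drop i) false := by
  by_cases h : i < argv.length
  · rw [stripLoopA, dif_pos h, drop_eq_cons argv i h]
    by_cases ht : argv[i] = "--toolchain"
    · rw [if_pos ht, stripLoopA_eq argv (i + 2) acc]
      simp only [stripRec, ht, if_neg (Bool.false_ne_true)]
      by_cases h2 : i + 1 < argv.length
      · rw [drop_eq_cons argv (i + 1) h2]
        simp [stripRec]
      · have e1 : argv.drop (i + 1) = [] := List.drop_eq_nil_of_le (by omega)
        have e2 : argv.drop (i + 2) = [] := List.drop_eq_nil_of_le (by omega)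
        simp [e1, e2, stripRec]
    · rw [if_neg ht, stripLoopA_eq argv (i + 1) (acc ++ [argv[i]])]
      simp [stripRec, ht]
  · rw [stripLoopA, dif_neg h]
    have : argv.drop i = [] := List.drop_eq_nil_of_le (by omega)
    simp [this, stripRec]
termination_by argv.length - i

-- ===== VERDICT =====
theorem strip_global_options_spec : Claim_equal_strip_global_options := by
  intro argv _
  unfold Spec_strip_global_options strip_global_options
  rw [stripLoopA_eq, alt_eq_stripRec]
  simp
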